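-- pv_equiv track=rewrite | github.com/jreisgen/Python-Programming | mooc-programming-21/part05-07_sudoku_grid/src/sudoku_grid.py | block_correct
-- ===== SOURCE A (Python) =====
-- def block_correct(sudoku: list, row_no: int, column_no: int):
--     numbers = []
--     for i in range(row_no, row_no+3):
--         for j in range(column_no, column_no+3):
--             ting = sudoku[i][j]
--             if ting in numbers and ting!=0:
--                 return False
--             else:
--                 numbers.append(ting)
--     return True
-- ===== SOURCE B (Python) =====
-- def block_correct(sudoku: list, row_no: int, column_no: int):
--     block = [sudoku[i][j] for i in range(row_no, row_no + 3)
--                           for j in range(column_no, column_no + 3)]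
--     vals = [v for v in block if v != 0]
--     return len(vals) == len(set(vals))
-- ===== Notes on version B (the rewrite author's own statement) =====
-- stated objective: simpler
-- what changed: Replaces the incremental per-cell membership scan with early return by building the block's nonzero values once and deciding via a single cardinality comparison len(vals) == len(set(vals)).
-- outside the precondition, e.g. on block_correct([[1, 1, 1]], 0, 0): A returns False, B raises IndexError
import Mathlib
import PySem

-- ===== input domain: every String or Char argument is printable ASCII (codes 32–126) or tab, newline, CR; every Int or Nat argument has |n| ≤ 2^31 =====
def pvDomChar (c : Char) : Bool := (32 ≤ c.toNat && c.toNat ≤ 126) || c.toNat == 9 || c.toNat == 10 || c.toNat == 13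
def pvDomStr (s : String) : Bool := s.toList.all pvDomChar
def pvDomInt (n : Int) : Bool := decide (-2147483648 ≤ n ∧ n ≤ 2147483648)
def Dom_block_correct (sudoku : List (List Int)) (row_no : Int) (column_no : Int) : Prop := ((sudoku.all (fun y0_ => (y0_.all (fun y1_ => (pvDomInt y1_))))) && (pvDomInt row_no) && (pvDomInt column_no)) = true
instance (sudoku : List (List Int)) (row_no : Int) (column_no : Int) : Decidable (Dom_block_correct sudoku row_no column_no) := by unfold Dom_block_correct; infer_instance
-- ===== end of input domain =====

-- B is a simpler decomposition: collect the block's nonzero values once and compare the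
-- count with the distinct count, instead of A's per-cell membership scan with early return.

-- ===== PORT A =====
-- inner 'for j' loop of A; Option state: none = the early 'return False' fired
def loopAInner (sudoku : List (List Int)) (i : Int) (js : List Int) (numbers : List Int) : Option (List Int) :=
  match js with
  | [] => some numbers
  | j :: rest =>
    let ting := PySem.List.pyGetD (PySem.List.pyGetD sudoku i []) j 0
    if numbers.contains ting && ting != 0 then none
    else loopAInner sudoku i rest (numbers ++ [ting])

-- outer 'for i' loop of A
def loopAOuter (sudoku : List (List Int)) (column_no : Int) (is : List Int) (numbers : List Int) : Option (List Int) :=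
  match is with
  | [] => some numbers
  | i :: rest =>
    match loopAInner sudoku i (PySem.List.pyRange column_no (column_no + 3) 1) numbers with
    | none => none
    | some ns => loopAOuter sudoku column_no rest ns

def block_correct (sudoku : List (List Int)) (row_no : Int) (column_no : Int) : Bool :=
  (loopAOuter sudoku column_no (PySem.List.pyRange row_no (row_no + 3) 1) []).isSome

-- ===== PORT B =====
def block_correct_alt (sudoku : List (List Int)) (row_no : Int) (column_no : Int) : Bool :=
  let block := (PySem.List.pyRange row_no (row_no + 3) 1).flatMap (fun i =>
    (PySem.List.pyRange column_no (column_no + 3) 1).map (fun j =>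
      PySem.List.pyGetD (PySem.List.pyGetD sudoku i []) j 0))
  let vals := block.filter (fun v => v != 0)
  vals.length == (PySem.Set.ofList vals).length

-- ===== PRECONDITION & SPEC =====
-- Pre_ requires all nine block cells to exist (Python indexing, so negative indices wrap).
-- It excludes some inputs on which A still RETURNS: A may hit a duplicate and return False
-- early, before ever touching a missing cell, while B reads the whole block first and raises.
def Pre_block_correct (sudoku : List (List Int)) (row_no : Int) (column_no : Int) : Prop :=
  ∀ i ∈ PySem.List.pyRange row_no (row_no + 3) 1,
    (PySem.List.pyGet? sudoku i).isSome = true ∧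
    ∀ j ∈ PySem.List.pyRange column_no (column_no + 3) 1,
      (PySem.List.pyGet? ((PySem.List.pyGet? sudoku i).getD []) j).isSome = true

instance (sudoku : List (List Int)) (row_no : Int) (column_no : Int) : Decidable (Pre_block_correct sudoku row_no column_no) := by unfold Pre_block_correct; infer_instance

def pvWitness_block_correct : List (List Int) × Int × Int := ([[1, 2, 3], [4, 5, 6], [7, 8, 9]], 0, 0)

def Spec_block_correct (sudoku : List (List Int)) (row_no : Int) (column_no : Int) (out : Bool) : Prop := out = block_correct_alt sudoku row_no column_no
instance (sudoku : List (List Int)) (row_no : Int) (column_no : Int) (out : Bool) : Decidable (Spec_block_correct sudoku row_no column_no out) := by unfold Spec_block_correct; infer_instance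

-- ===== CLAIM (what is proved, stated in full; the proofs are below) =====
def Claim_equal_block_correct : Prop := ∀ (sudoku : List (List Int)) (row_no : Int) (column_no : Int), Dom_block_correct sudoku row_no column_no → Pre_block_correct sudoku row_no column_no → Spec_block_correct sudoku row_no column_no (block_correct sudoku row_no column_no)

-- ===== LEMMAS AND PROOFS =====

-- A's scan, abstracted over the flat list of visited cell values
def scan1 (nums : List Int) (L : List Int) : Option (List Int) :=
  match L with
  | [] => some nums
  | t :: ts =>
    if nums.contains t && t != 0 then none
    else scan1 (nums ++ [t]) ts

theorem loopAInner_eq_scan1 (sudoku : List (List Int)) (i : Int) (js : List Int) (nums : List Int) :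
    loopAInner sudoku i js nums
      = scan1 nums (js.map (fun j => PySem.List.pyGetD (PySem.List.pyGetD sudoku i []) j 0)) := by
  induction js generalizing nums with
  | nil => rfl
  | cons j rest ih => simp only [loopAInner, scan1, List.map]; split <;> simp [ih]

theorem scan1_append (L1 L2 nums : List Int) :
    scan1 nums (L1 ++ L2) = (scan1 nums L1).bind (fun ns => scan1 ns L2) := by
  induction L1 generalizing nums with
  | nil => rfl
  | cons t ts ih => simp only [List.cons_append, scan1]; split <;> simp [ih]

theorem loopAOuter_eq_scan1 (sudoku : List (List Int)) (column_no : Int) (is : List Int) (nums : List Int) :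
    loopAOuter sudoku column_no is nums
      = scan1 nums (is.flatMap (fun i =>
          (PySem.List.pyRange column_no (column_no + 3) 1).map
            (fun j => PySem.List.pyGetD (PySem.List.pyGetD sudoku i []) j 0))) := by
  induction is generalizing nums with
  | nil => rfl
  | cons i rest ih =>
    simp only [loopAOuter, List.flatMap_cons, scan1_append, loopAInner_eq_scan1]
    cases scan1 nums ((PySem.List.pyRange column_no (column_no + 3) 1).map
      (fun j => PySem.List.pyGetD (PySem.List.pyGetD sudoku i []) j 0)) with
    | none => rfl
    | some ns => simp [ih]

theorem scan1_isSome_iff (L : List Int) : ∀ nums : List Int,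
    (nums.filter (fun v => v != 0)).Nodup →
    ((scan1 nums L).isSome = true ↔ ((nums ++ L).filter (fun v => v != 0)).Nodup) := by
  induction L with
  | nil =>
    intro nums h
    rw [List.append_nil]
    simp only [scan1, Option.isSome_some]
    exact iff_of_true trivial h
  | cons t ts ih =>
    intro nums h
    simp only [scan1]
    have hsplit : nums ++ t :: ts = (nums ++ [t]) ++ ts := by simp
    by_cases ht : t = 0
    · subst ht
      have hcond : (nums.contains (0:Int) && (0:Int) != 0) = false := by simp
      rw [hcond]
      simp only [Bool.false_eq_true, if_false]
      have hfil : ((nums ++ [(0:Int)]).filter (fun v => v != 0)) = nums.filter (fun v => v != 0) := by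
        simp [List.filter_append]
      rw [hsplit, ← ih (nums ++ [(0:Int)]) (by rw [hfil]; exact h)]
    · by_cases hc : t ∈ nums
      · have hcond : (nums.contains t && t != 0) = true := by
          simp only [Bool.and_eq_true, List.contains_iff_mem, bne_iff_ne, ne_eq]
          exact ⟨hc, ht⟩
        rw [hcond]
        simp only [if_true, Option.isSome_none, Bool.false_eq_true, false_iff]
        intro hnd
        rw [List.filter_append] at hnd
        have htf : t ∈ nums.filter (fun v => v != 0) :=
          List.mem_filter.mpr ⟨hc, by simpa using ht⟩
        have htf2 : t ∈ (t :: ts).filter (fun v => v != 0) := by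
          rw [List.filter_cons_of_pos (by simpa using ht)]
          exact List.mem_cons_self
        exact (List.disjoint_of_nodup_append hnd) htf htf2
      · have hcond : (nums.contains t && t != 0) = false := by
          simp only [Bool.and_eq_false_iff]
          exact Or.inl (by simpa using hc)
        rw [hcond]
        simp only [Bool.false_eq_true, if_false]
        have hfil : ((nums ++ [t]).filter (fun v => v != 0))
            = nums.filter (fun v => v != 0) ++ [t] := by
          rw [List.filter_append, List.filter_cons_of_pos (by simpa using ht)]
          rfl
        have hnd' : ((nums ++ [t]).filter (fun v => v != 0)).Nodup := by
          rw [hfil]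
          refine List.Nodup.append h (List.nodup_singleton t) ?_
          intro x hx hy
          rw [List.mem_singleton] at hy; subst hy
          exact hc (List.mem_filter.mp hx).1
        rw [hsplit, ← ih (nums ++ [t]) hnd']

-- B side: len(vals) == len(set(vals)) decides Nodup
theorem ofList_sublist (l : List Int) : ∀ s : List Int, (l.foldl PySem.Set.add s).Sublist (s ++ l) := by
  induction l with
  | nil => intro s; simp
  | cons x xs ih =>
    intro s
    have h1 : (PySem.Set.add s x).Sublist (s ++ [x]) := by
      by_cases hx : PySem.Set.contains s x = true
      · simp only [PySem.Set.add, if_pos hx]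
        exact List.sublist_append_left s [x]
      · simp only [PySem.Set.add, if_neg hx]
        exact List.Sublist.refl _
    have h2 := (ih (PySem.Set.add s x)).trans (h1.append_right xs)
    simpa using h2

theorem foldl_add_of_nodup (l : List Int) : ∀ s : List Int, l.Nodup → (∀ x ∈ l, x ∉ s) →
    l.foldl PySem.Set.add s = s ++ l := by
  induction l with
  | nil => intro s _ _; simp
  | cons x xs ih =>
    intro s hnd hdis
    have hx : x ∉ s := hdis x List.mem_cons_self
    have hstep : (x :: xs).foldl PySem.Set.add s = xs.foldl PySem.Set.add (s ++ [x]) := by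
      simp [List.foldl_cons, PySem.Set.add, hx]
    rw [hstep, ih (s ++ [x]) (List.Nodup.of_cons hnd) ?_]
    · simp
    · intro y hy
      rw [List.mem_append, List.mem_singleton]
      rintro (hmem | rfl)
      · exact hdis y (List.mem_cons_of_mem x hy) hmem
      · exact (List.nodup_cons.mp hnd).1 hy

theorem ofList_length_iff (l : List Int) :
    ((PySem.Set.ofList l).length = l.length) ↔ l.Nodup := by
  constructor
  · intro hlen
    have hsub : (PySem.Set.ofList l).Sublist l := by
      simpa [PySem.Set.ofList_eq_foldl] using ofList_sublist l []
    have heq : PySem.Set.ofList l = l := hsub.eq_of_length hlen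
    rw [← heq]
    exact PySem.Set.nodup_ofList l
  · intro hnd
    have heq : PySem.Set.ofList l = l := by
      have := foldl_add_of_nodup l [] hnd (by simp)
      simpa [PySem.Set.ofList_eq_foldl] using this
    rw [heq]

-- ===== VERDICT (by name: the statement is the Claim_ definition above) =====
theorem block_correct_spec : Claim_equal_block_correct := by
  intro sudoku row_no column_no _ _
  unfold Spec_block_correct block_correct block_correct_alt
  rw [loopAOuter_eq_scan1]
  set cells := (PySem.List.pyRange row_no (row_no + 3) 1).flatMap (fun i =>
    (PySem.List.pyRange column_no (column_no + 3) 1).map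
      (fun j => PySem.List.pyGetD (PySem.List.pyGetD sudoku i []) j 0)) with hc
  set vals := cells.filter (fun v => v != 0) with hv
  have hA := scan1_isSome_iff cells [] (by simp)
  rw [List.nil_append] at hA
  have hB : (vals.length == (PySem.Set.ofList vals).length) = true ↔ vals.Nodup := by
    rw [beq_iff_eq, eq_comm, ofList_length_iff]
  rw [Bool.eq_iff_iff, hA, hB]
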